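-- pv_equiv track=rewrite | github.com/holymancini-glitch/Universal-Consciousness-Interface | core/shamanic_technology_layer.py | _generate_integration_suggestions
-- ===== SOURCE A (Python) =====
-- from typing import Dict, List, Optional, Tuple, Any, Union
--
-- def _generate_integration_suggestions(insights: List[str]) -> List[str]:
--     """Generate suggestions for integrating visionary insights"""
--     suggestions = []
--
--     # Simple approach based on insight content
--     for insight in insights:
--         if 'personal' in insight.lower() or 'self' in insight.lower():
--             suggestions.append("Integrate this insight into your personal growth practices")
--         elif 'community' in insight.lower() or 'collective' in insight.lower():
--             suggestions.append("Share this wisdom with your community")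
--         elif 'nature' in insight.lower() or 'earth' in insight.lower():
--             suggestions.append("Connect this insight with nature-based practices")
--         elif 'spirit' in insight.lower() or 'divine' in insight.lower():
--             suggestions.append("Meditate on this insight for spiritual deepening")
--         else:
--             suggestions.append("Reflect on how this insight applies to your life path")
--
--     return suggestions
-- ===== SOURCE B (Python) =====
-- from typing import List
--
-- _RULES = [
--     (('personal', 'self'), "Integrate this insight into your personal growth practices"),
--     (('community', 'collective'), "Share this wisdom with your community"),
--     (('nature', 'earth'), "Connect this insight with nature-based practices"),
--     (('spirit', 'divine'), "Meditate on this insight for spiritual deepening"),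
-- ]
-- _DEFAULT = "Reflect on how this insight applies to your life path"
--
--
-- def _generate_integration_suggestions(insights: List[str]) -> List[str]:
--     # Staged overwrite passes: start with the fallback everywhere, then sweep the
--     # rules from lowest to highest priority, overwriting every matching slot.
--     # The last overwrite (highest priority rule) wins, which equals first-match.
--     texts = [s.lower() for s in insights]
--     out = [_DEFAULT for _ in texts]
--     for keywords, suggestion in reversed(_RULES):
--         out = [suggestion if any(k in t for k in keywords) else o
--                for t, o in zip(texts, out)]
--     return out
-- ===== Notes on version B (the rewrite author's own statement) =====
-- stated objective: alternative
-- what changed: Replaces the per-item first-match if/elif ladder with staged column-wise passes: the output starts as all fallbacks and each rule, swept from lowest to highest priority, overwrites every matching position, so the last overwrite reproduces first-match semantics.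
import Mathlib
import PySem

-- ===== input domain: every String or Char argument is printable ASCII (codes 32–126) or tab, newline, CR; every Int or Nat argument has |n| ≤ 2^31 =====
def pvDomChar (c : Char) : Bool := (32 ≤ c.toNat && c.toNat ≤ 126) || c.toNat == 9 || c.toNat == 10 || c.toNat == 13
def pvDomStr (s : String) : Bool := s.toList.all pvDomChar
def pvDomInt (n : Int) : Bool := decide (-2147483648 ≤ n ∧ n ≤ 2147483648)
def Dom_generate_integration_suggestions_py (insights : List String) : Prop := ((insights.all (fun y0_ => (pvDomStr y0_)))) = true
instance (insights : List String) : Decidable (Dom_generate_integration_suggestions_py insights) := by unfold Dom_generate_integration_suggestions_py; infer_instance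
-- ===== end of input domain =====

-- B replaces A's per-item first-match ladder with staged column-wise overwrite passes over the rules (alternative decomposition; same cost).

-- ===== PORT A =====
def generate_integration_suggestions_py (insights : List String) : List String :=
  insights.foldl (fun suggestions insight =>
    if PySem.Str.isIn "personal" (PySem.Str.lower insight) || PySem.Str.isIn "self" (PySem.Str.lower insight) then
      suggestions ++ ["Integrate this insight into your personal growth practices"]
    else if PySem.Str.isIn "community" (PySem.Str.lower insight) || PySem.Str.isIn "collective" (PySem.Str.lower insight) then
      suggestions ++ ["Share this wisdom with your community"]
    else if PySem.Str.isIn "nature" (PySem.Str.lower insight) || PySem.Str.isIn "earth" (PySem.Str.lower insight) then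
      suggestions ++ ["Connect this insight with nature-based practices"]
    else if PySem.Str.isIn "spirit" (PySem.Str.lower insight) || PySem.Str.isIn "divine" (PySem.Str.lower insight) then
      suggestions ++ ["Meditate on this insight for spiritual deepening"]
    else
      suggestions ++ ["Reflect on how this insight applies to your life path"]) []

-- ===== PORT B =====
def pvRules : List (List String × String) :=
  [ (["personal", "self"], "Integrate this insight into your personal growth practices"),
    (["community", "collective"], "Share this wisdom with your community"),
    (["nature", "earth"], "Connect this insight with nature-based practices"),
    (["spirit", "divine"], "Meditate on this insight for spiritual deepening") ]

def pvDefault : String := "Reflect on how this insight applies to your life path"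

-- one overwrite pass: '[sugg if any(k in t for k in kws) else o for t, o in zip(texts, out)]'
def pvPass (texts : List String) (out : List String) (kws : List String) (sugg : String) : List String :=
  (texts.zip out).map (fun p => if kws.any (fun k => PySem.Str.isIn k p.1) then sugg else p.2)

def generate_integration_suggestions_py_alt (insights : List String) : List String :=
  let texts := insights.map (fun s => PySem.Str.lower s)
  pvRules.reverse.foldl (fun out r => pvPass texts out r.1 r.2)
    (texts.map (fun _ => pvDefault))

-- ===== PRECONDITION & SPEC =====
def Spec_generate_integration_suggestions_py (insights : List String) (out : List String) : Prop := out = generate_integration_suggestions_py_alt insights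
instance (insights : List String) (out : List String) : Decidable (Spec_generate_integration_suggestions_py insights out) := by unfold Spec_generate_integration_suggestions_py; infer_instance

-- ===== CLAIM (what is proved, stated in full; the proofs are below) =====
def Claim_equal_generate_integration_suggestions_py : Prop := ∀ (insights : List String), Dom_generate_integration_suggestions_py insights → Spec_generate_integration_suggestions_py insights (generate_integration_suggestions_py insights)

-- ===== LEMMAS AND PROOFS =====

-- a pass over a mapped output is a pointwise rewrite
theorem pvPass_map (texts : List String) (h : String → String) (kws : List String) (sugg : String) :
    pvPass texts (texts.map h) kws sugg
      = texts.map (fun t => if kws.any (fun k => PySem.Str.isIn k t) then sugg else h t) := by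
  induction texts with
  | nil => rfl
  | cons a l ih => simp [pvPass, List.zip] at ih ⊢; exact ih

-- folding passes over a mapped output rewrites each position independently
theorem pvFoldPass (rules : List (List String × String)) (texts : List String) (h : String → String) :
    rules.foldl (fun out r => pvPass texts out r.1 r.2) (texts.map h)
      = texts.map (fun t => rules.foldl
          (fun v r => if r.1.any (fun k => PySem.Str.isIn k t) then r.2 else v) (h t)) := by
  induction rules generalizing h with
  | nil => rfl
  | cons r rs ih =>
    rw [List.foldl_cons, pvPass_map, ih]
    simp

-- A's accumulator fold appends one suggestion per insight
theorem pvFold_eq (insights : List String) (acc : List String) :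
    insights.foldl (fun suggestions insight =>
      if PySem.Str.isIn "personal" (PySem.Str.lower insight) || PySem.Str.isIn "self" (PySem.Str.lower insight) then
        suggestions ++ ["Integrate this insight into your personal growth practices"]
      else if PySem.Str.isIn "community" (PySem.Str.lower insight) || PySem.Str.isIn "collective" (PySem.Str.lower insight) then
        suggestions ++ ["Share this wisdom with your community"]
      else if PySem.Str.isIn "nature" (PySem.Str.lower insight) || PySem.Str.isIn "earth" (PySem.Str.lower insight) then
        suggestions ++ ["Connect this insight with nature-based practices"]
      else if PySem.Str.isIn "spirit" (PySem.Str.lower insight) || PySem.Str.isIn "divine" (PySem.Str.lower insight) then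
        suggestions ++ ["Meditate on this insight for spiritual deepening"]
      else
        suggestions ++ ["Reflect on how this insight applies to your life path"]) acc
    = acc ++ insights.map (fun insight =>
      if PySem.Str.isIn "personal" (PySem.Str.lower insight) || PySem.Str.isIn "self" (PySem.Str.lower insight) then
        "Integrate this insight into your personal growth practices"
      else if PySem.Str.isIn "community" (PySem.Str.lower insight) || PySem.Str.isIn "collective" (PySem.Str.lower insight) then
        "Share this wisdom with your community"
      else if PySem.Str.isIn "nature" (PySem.Str.lower insight) || PySem.Str.isIn "earth" (PySem.Str.lower insight) then
        "Connect this insight with nature-based practices"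
      else if PySem.Str.isIn "spirit" (PySem.Str.lower insight) || PySem.Str.isIn "divine" (PySem.Str.lower insight) then
        "Meditate on this insight for spiritual deepening"
      else
        "Reflect on how this insight applies to your life path") := by
  induction insights generalizing acc with
  | nil => simp
  | cons h t ih =>
    rw [List.foldl_cons, ih, List.map_cons]
    split_ifs <;> simp

-- ===== VERDICT (by name: the statement is the Claim_ definition above) =====
theorem generate_integration_suggestions_py_spec : Claim_equal_generate_integration_suggestions_py := by
  intro insights _
  unfold Spec_generate_integration_suggestions_py generate_integration_suggestions_py generate_integration_suggestions_py_alt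
  rw [pvFold_eq insights []]
  rw [List.nil_append]
  show _ = pvRules.reverse.foldl
      (fun out r => pvPass (insights.map (fun s => PySem.Str.lower s)) out r.1 r.2)
      ((insights.map (fun s => PySem.Str.lower s)).map (fun _ => pvDefault))
  rw [pvFoldPass]
  simp only [List.map_map]
  apply List.map_congr_left
  intro s _
  simp only [pvRules, pvDefault, List.reverse_cons, List.reverse_nil, List.nil_append,
    List.foldl_cons, List.foldl_nil, List.cons_append,
    List.any_cons, List.any_nil, Bool.or_false]
  split_ifs <;> simp_all
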